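-- pv_equiv track=rewrite | github.com/danagle/advent-of-code-python | 2024/05/solution.py | day05
-- ===== SOURCE A (Python) =====
-- def check(page_sequence, rules):
--     for i, page in enumerate(page_sequence):
--         if page in rules:
--             before = rules[page]
--             after = set(page_sequence[i+1:])
--             for prev_page in before:
--                 if prev_page in page_sequence and prev_page not in after:
--                     return False
--     return True
--
-- def sort(page_sequence, rules):
--     result = []
--     seen = set()
--
--     while len(result) < len(page_sequence):
--         for p in page_sequence:
--             if p in seen:
--                 continue
--             valid = True
--             for q, pages_before in rules.items():
--                 if q not in page_sequence or q in seen: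
--                     continue
--                 if p in pages_before and q not in seen:
--                     valid = False
--                     break
--             if valid:
--                 result.append(p)
--                 seen.add(p)
--                 break
--     return result
--
-- def day05(rules, sequences):
--     part_1 = part_2 = 0
--     for seq in sequences:
--         middle_index = len(seq) // 2
--         if (check(seq, rules)):
--             part_1 += seq[middle_index]
--         else:
--             sorted_seq = sort(seq, rules)
--             part_2 += sorted_seq[middle_index]
--     return part_1, part_2
-- ===== SOURCE B (Python) =====
-- def day05(rules, sequences):
--     part_1 = part_2 = 0
--     for seq in sequences:
--         n = len(seq)
--         middle_index = n // 2
--         last_pos = {}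
--         for i, page in enumerate(seq):
--             last_pos[page] = i
--         if not any(last_pos.get(prev, n) <= i
--                    for i, page in enumerate(seq)
--                    for prev in rules.get(page, ())):
--             part_1 += seq[middle_index]
--         else:
--             part_2 += next(p for p in seq
--                            if sum(1 for q in seq if q != p and p in rules.get(q, ())) == middle_index)
--     return part_1, part_2
-- ===== Notes on version B (the rewrite author's own statement) =====
-- stated objective: faster
-- what changed: The per-index validity check that builds set(seq[i+1:]) for every position is replaced by one last-position dict built in a single pass, and the selection-sort loop (which rescans the whole sequence and all rules for every output slot) is replaced by computing the middle page directly as the page with exactly len(seq)//2 predecessors under the rules. Pre_ excludes empty sequences (A raises IndexError) and incorrectly-ordered sequences whose pages the rules do not strictly totally order, where A's sort loops forever or its output order is an accidental tie-break of A's scan.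
-- outside the precondition, e.g. on day05({1: [2]}, [[2, 1, 3, 4]]): A returns (0, 3), B raises StopIteration
import Mathlib
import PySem

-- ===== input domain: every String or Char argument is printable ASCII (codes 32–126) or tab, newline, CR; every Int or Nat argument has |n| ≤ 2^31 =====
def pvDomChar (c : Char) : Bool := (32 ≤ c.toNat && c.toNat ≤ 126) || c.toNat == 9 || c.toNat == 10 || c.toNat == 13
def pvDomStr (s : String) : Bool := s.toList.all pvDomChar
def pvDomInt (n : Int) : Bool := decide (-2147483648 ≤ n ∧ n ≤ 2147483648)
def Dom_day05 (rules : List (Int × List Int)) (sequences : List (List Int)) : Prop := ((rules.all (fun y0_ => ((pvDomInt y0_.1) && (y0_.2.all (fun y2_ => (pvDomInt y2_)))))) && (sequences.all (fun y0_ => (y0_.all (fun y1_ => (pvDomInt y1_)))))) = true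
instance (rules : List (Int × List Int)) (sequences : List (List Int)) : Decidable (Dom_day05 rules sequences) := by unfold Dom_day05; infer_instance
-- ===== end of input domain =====

-- B replaces A's per-index slice-to-set validity check by a single last-position dict pass, and replaces
-- A's repeated-scan selection sort of invalid sequences by a direct predecessor-count rank computation
-- (the middle page is the page with exactly ⌊n/2⌋ predecessors under the rules).

-- ===== PORT A =====
-- check(page_sequence, rules): early-return-False loop ported as List.any over enumerate
def day05Check (d : PySem.Dict Int (List Int)) (seq : List Int) : Bool :=
  !((PySem.List.enumerate seq 0).any (fun ip =>
      if d.contains ip.2 then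
        -- before = rules[page]; after = set(page_sequence[i+1:])
        (d.getD ip.2 []).any (fun prev =>
          decide (prev ∈ seq) &&
            !(PySem.Set.contains (PySem.Set.ofList (PySem.List.slice seq (some (ip.1 + 1)) none)) prev))
      else false))

-- inner 'for q, pages_before in rules.items()' loop with break, ported as List.any over d.items
def day05SortValid (d : PySem.Dict Int (List Int)) (seq : List Int)
    (seen : PySem.Set Int) (p : Int) : Bool :=
  !(d.items.any (fun qv =>
      if !(decide (qv.1 ∈ seq)) || PySem.Set.contains seen qv.1 then false
      else qv.2.contains p && !(PySem.Set.contains seen qv.1)))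

-- while len(result) < len(page_sequence): one inner 'for p in page_sequence' pass per call.
-- Each terminating Python pass appends exactly one page, so fuel = len(page_sequence) is exact;
-- a pass that appends nothing is Python's infinite loop (excluded by Pre_): we stop with 'result'.
def day05SortLoop (d : PySem.Dict Int (List Int)) (seq : List Int) :
    Nat → List Int → PySem.Set Int → List Int
  | 0, result, _ => result
  | fuel + 1, result, seen =>
    if result.length < seq.length then
      match seq.find? (fun p => !(PySem.Set.contains seen p) && day05SortValid d seq seen p) with
      | some p => day05SortLoop d seq fuel (result ++ [p]) (PySem.Set.add seen p)
      | none => result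
    else result

def day05Sort (d : PySem.Dict Int (List Int)) (seq : List Int) : List Int :=
  day05SortLoop d seq seq.length [] PySem.Set.empty

def day05 (rules : List (Int × List Int)) (sequences : List (List Int)) : Int × Int :=
  let d := PySem.Dict.ofList rules
  sequences.foldl (fun acc seq =>
    let middle := PySem.Int.floordiv (PySem.List.len seq) 2
    if day05Check d seq then
      -- seq[middle_index]: in range under Pre_ (seq nonempty)
      (acc.1 + PySem.List.pyGetD seq middle 0, acc.2)
    else
      (acc.1, acc.2 + PySem.List.pyGetD (day05Sort d seq) middle 0)) ((0 : Int), (0 : Int))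

-- ===== PORT B =====
-- last_pos = {page: i for each occurrence, last wins}
def day05AltLast (seq : List Int) : PySem.Dict Int Int :=
  (PySem.List.enumerate seq 0).foldl (fun lp ip => lp.insert ip.2 ip.1) PySem.Dict.empty

-- any(last_pos.get(prev, n) <= i for i, page in enumerate(seq) for prev in rules.get(page, ()))
def day05AltBad (d : PySem.Dict Int (List Int)) (seq : List Int) : Bool :=
  let lp := day05AltLast seq
  (PySem.List.enumerate seq 0).any (fun ip =>
    (d.getD ip.2 []).any (fun prev =>
      decide (lp.getD prev (PySem.List.len seq) ≤ ip.1)))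

-- sum(1 for q in seq if q != p and p in rules.get(q, ())) — the generator-sum is a count
def day05AltCount (d : PySem.Dict Int (List Int)) (seq : List Int) (p : Int) : Int :=
  ((seq.countP (fun q => q != p && (d.getD q []).contains p) : Nat) : Int)

def day05_alt (rules : List (Int × List Int)) (sequences : List (List Int)) : Int × Int :=
  let d := PySem.Dict.ofList rules
  sequences.foldl (fun acc seq =>
    let middle := PySem.Int.floordiv (PySem.List.len seq) 2
    if !(day05AltBad d seq) then
      (acc.1 + PySem.List.pyGetD seq middle 0, acc.2)
    else
      -- next(p for p in seq if …): Pre_ guarantees the page exists (0 is never reached there)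
      (acc.1, acc.2 + (match seq.find? (fun p => day05AltCount d seq p == middle) with
                       | some p => p
                       | none => 0))) ((0 : Int), (0 : Int))

-- ===== PRECONDITION & SPEC =====
-- Pre_ excludes (a) empty sequences (A raises IndexError on seq[middle]); (b) incorrectly-ordered
-- sequences whose pages are not strictly totally ordered by the rules (the puzzle input's guarantee):
-- without it A's sort either loops forever (duplicates, cycles) or its result order is an accidental
-- tie-break of A's scan, and B's rank computation may raise StopIteration or pick another page there.
def Pre_day05 (rules : List (Int × List Int)) (sequences : List (List Int)) : Prop :=
  ∀ seq ∈ sequences, seq ≠ [] ∧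
    ((∀ (i : Fin seq.length), ∀ prev ∈ (PySem.Dict.ofList rules).getD seq[i] [],
        prev ∈ seq → prev ∈ seq.drop (i.1 + 1))
     ∨ (seq.Nodup
        ∧ (∀ x ∈ seq, x ∉ (PySem.Dict.ofList rules).getD x [])
        ∧ (∀ x ∈ seq, ∀ y ∈ seq, x ≠ y →
            (y ∈ (PySem.Dict.ofList rules).getD x [] ↔ x ∉ (PySem.Dict.ofList rules).getD y []))
        ∧ (∀ x ∈ seq, ∀ y ∈ seq, ∀ z ∈ seq,
            y ∈ (PySem.Dict.ofList rules).getD x [] → z ∈ (PySem.Dict.ofList rules).getD y [] →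
            z ∈ (PySem.Dict.ofList rules).getD x [])))

instance (rules : List (Int × List Int)) (sequences : List (List Int)) : Decidable (Pre_day05 rules sequences) := by
  unfold Pre_day05; infer_instance

def pvWitness_day05 : (List (Int × List Int)) × List (List Int) :=
  ([(1, [2])], [[2, 1], [1, 2]])

def Spec_day05 (rules : List (Int × List Int)) (sequences : List (List Int)) (out : Int × Int) : Prop := out = day05_alt rules sequences
instance (rules : List (Int × List Int)) (sequences : List (List Int)) (out : Int × Int) : Decidable (Spec_day05 rules sequences out) := by unfold Spec_day05; infer_instance

-- ===== CLAIM (what is proved, stated in full; the proofs are below) =====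
def Claim_equal_day05 : Prop := ∀ (rules : List (Int × List Int)) (sequences : List (List Int)), Dom_day05 rules sequences → Pre_day05 rules sequences → Spec_day05 rules sequences (day05 rules sequences)

-- ===== LEMMAS AND PROOFS =====

-- y must come after x according to the rules dict
def pvRel (d : PySem.Dict Int (List Int)) (x y : Int) : Prop := y ∈ d.getD x []

-- last_pos over xs ++ [a] inserts a at index xs.length
lemma altLast_append (xs : List Int) (a : Int) :
    day05AltLast (xs ++ [a]) = (day05AltLast xs).insert a (xs.length : Int) := by
  unfold day05AltLast
  rw [PySem.List.enumerate_append, List.foldl_append]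
  simp [PySem.List.enumerate_cons, PySem.List.enumerate_nil]

-- characterisation of B's last-position dict
lemma altLast_char (xs : List Int) (x : Int) :
    ((day05AltLast xs).get? x = none ↔ x ∉ xs) ∧
    (∀ v : Int, (day05AltLast xs).get? x = some v →
       ∃ j : Nat, v = (j : Int) ∧ xs[j]? = some x ∧ x ∉ xs.drop (j + 1)) := by
  induction xs using List.reverseRecOn with
  | nil =>
    constructor
    · simp [day05AltLast, PySem.List.enumerate_nil, PySem.Dict.get?_empty]
    · intro v h; simp [day05AltLast, PySem.List.enumerate_nil, PySem.Dict.get?_empty] at h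
  | append_singleton xs a ih =>
    rw [altLast_append]
    rw [PySem.Dict.get?_insert]
    by_cases hxa : x = a
    · subst hxa
      simp only [reduceIte]
      constructor
      · simp
      · intro v hv
        refine ⟨xs.length, by simpa using hv.symm, ?_, ?_⟩
        · simp
        · rw [show xs.length + 1 = (xs ++ [x]).length by simp]
          simp
    · simp only [if_neg hxa]
      constructor
      · rw [ih.1]; simp [hxa]
      · intro v hv
        obtain ⟨j, hj, hget, hnd⟩ := ih.2 v hv
        have hjlt : j < xs.length := by
          by_contra h
          rw [List.getElem?_eq_none (Nat.le_of_not_lt h)] at hget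
          simp at hget
        refine ⟨j, hj, ?_, ?_⟩
        · rw [List.getElem?_append_left hjlt]; exact hget
        · rw [List.drop_append_of_le_length (by omega)]
          simp [hnd, hxa]

-- 'last occurrence ≤ k' = 'in the list but not after position k'
lemma altLast_le_iff (xs : List Int) (x : Int) (k : Nat) (hk : k < xs.length) :
    ((day05AltLast xs).getD x (PySem.List.len xs) ≤ (k : Int)) ↔
    (x ∈ xs ∧ x ∉ xs.drop (k + 1)) := by
  rw [PySem.Dict.getD_eq_get?_getD]
  rcases hg : (day05AltLast xs).get? x with _ | v
  · have hx : x ∉ xs := (altLast_char xs x).1.1 hg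
    simp only [Option.getD_none, PySem.List.len_eq]
    constructor
    · intro h; exact absurd (by exact_mod_cast h : xs.length ≤ k) (by omega)
    · intro h; exact absurd h.1 hx
  · obtain ⟨j, hv, hget, hnd⟩ := (altLast_char xs x).2 v hg
    subst hv
    simp only [Option.getD_some, Nat.cast_le]
    have hxmem : x ∈ xs := by
      have := List.getElem?_eq_some_iff.mp hget
      obtain ⟨h1, h2⟩ := this
      exact h2 ▸ List.getElem_mem h1
    constructor
    · intro hjk
      refine ⟨hxmem, fun hc => hnd ?_⟩
      have : xs.drop (k + 1) = (xs.drop (j + 1)).drop (k - j) := by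
        rw [List.drop_drop]; congr 1; omega
      rw [this] at hc
      exact List.drop_subset _ _ hc
    · rintro ⟨-, hnotk⟩
      by_contra h
      have hj : k + 1 ≤ j := by omega
      apply hnotk
      have : (xs.drop (k+1))[j - (k+1)]? = some x := by
        rw [List.getElem?_drop]
        rw [show k + 1 + (j - (k+1)) = j by omega]
        exact hget
      exact List.mem_of_getElem? this

-- seq[i+1:] for a non-negative index is drop (i+1)
lemma slice_succ_eq_drop (seq : List Int) (k : Nat) :
    PySem.List.slice seq (some ((k:Int) + 1)) none = seq.drop (k+1) := by
  rw [show (k:Int) + 1 = ((k+1 : Nat) : Int) by push_cast; ring]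
  exact PySem.List.slice_from_natCast seq (k+1)

-- A's check fails exactly on a rule violation
lemma check_false_iff (d : PySem.Dict Int (List Int)) (seq : List Int) :
    day05Check d seq = false ↔
    ∃ (i : Fin seq.length), ∃ prev ∈ d.getD seq[i] [],
      prev ∈ seq ∧ prev ∉ seq.drop (i.1 + 1) := by
  unfold day05Check
  rw [Bool.not_eq_false', List.any_eq_true]
  constructor
  · rintro ⟨ip, hip, hb⟩
    rw [PySem.List.mem_enumerate_iff] at hip
    obtain ⟨k, hk, rfl⟩ := hip
    by_cases hc : d.contains (seq[k]) = true
    · rw [if_pos hc, List.any_eq_true] at hb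
      obtain ⟨prev, hprev, hpb⟩ := hb
      rw [Bool.and_eq_true, Bool.not_eq_true', decide_eq_true_iff] at hpb
      refine ⟨⟨k, hk⟩, prev, by simpa using hprev, hpb.1, ?_⟩
      have h2 := hpb.2
      rw [show ((((0:Int) + k, seq[k]) : Int × Int).1) = ((0:Int) + (k:Int)) from rfl,
          show (0:Int) + (k:Int) = (k:Int) by ring, slice_succ_eq_drop] at h2
      intro hmem
      rw [show PySem.Set.contains (PySem.Set.ofList (seq.drop (k+1))) prev
            = decide (prev ∈ PySem.Set.ofList (seq.drop (k+1))) from by simp [PySem.Set.contains]]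
        at h2
      rw [decide_eq_false_iff_not, PySem.Set.mem_ofList] at h2
      exact h2 hmem
    · rw [if_neg hc] at hb; simp at hb
  · rintro ⟨⟨k, hk⟩, prev, hprev, hmem, hnd⟩
    simp only [Fin.getElem_fin] at hprev
    simp only [] at hnd
    have hc : d.contains (seq[k]) = true := by
      by_contra h
      rw [Bool.not_eq_true] at h
      rw [PySem.Dict.getD_of_not_contains d [] h] at hprev
      simp at hprev
    refine ⟨((k:Int), seq[k]), ?_, ?_⟩
    · rw [PySem.List.mem_enumerate_iff]
      exact ⟨k, hk, by simp⟩
    · rw [show (((k:Int), seq[k]) : Int × Int).2 = seq[k] from rfl, if_pos hc, List.any_eq_true]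
      refine ⟨prev, hprev, ?_⟩
      rw [Bool.and_eq_true, Bool.not_eq_true', decide_eq_true_iff]
      refine ⟨hmem, ?_⟩
      rw [show (((k:Int), seq[k]) : Int × Int).1 = (k:Int) from rfl]
      rw [slice_succ_eq_drop]
      rw [show PySem.Set.contains (PySem.Set.ofList (seq.drop (k+1))) prev
            = decide (prev ∈ PySem.Set.ofList (seq.drop (k+1))) from by simp [PySem.Set.contains]]
      rw [decide_eq_false_iff_not, PySem.Set.mem_ofList]
      exact hnd

-- B's last-position scan fires exactly on a rule violation
lemma altBad_true_iff (d : PySem.Dict Int (List Int)) (seq : List Int) :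
    day05AltBad d seq = true ↔
    ∃ (i : Fin seq.length), ∃ prev ∈ d.getD seq[i] [],
      prev ∈ seq ∧ prev ∉ seq.drop (i.1 + 1) := by
  unfold day05AltBad
  rw [List.any_eq_true]
  constructor
  · rintro ⟨ip, hip, hb⟩
    rw [PySem.List.mem_enumerate_iff] at hip
    obtain ⟨k, hk, rfl⟩ := hip
    rw [List.any_eq_true] at hb
    obtain ⟨prev, hprev, hpb⟩ := hb
    rw [decide_eq_true_iff] at hpb
    rw [show (((0:Int) + k, seq[k]) : Int × Int).1 = ((0:Int) + k) from rfl] at hpb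
    rw [show ((0:Int) + k) = (k : Int) by ring] at hpb
    have := (altLast_le_iff seq prev k hk).mp hpb
    exact ⟨⟨k, hk⟩, prev, by simpa using hprev, this.1, this.2⟩
  · rintro ⟨⟨k, hk⟩, prev, hprev, hmem, hnd⟩
    simp only [Fin.getElem_fin] at hprev
    refine ⟨((0:Int) + (k:Int), seq[k]), ?_, ?_⟩
    · rw [PySem.List.mem_enumerate_iff]
      exact ⟨k, hk, by simp⟩
    · rw [List.any_eq_true]
      refine ⟨prev, hprev, ?_⟩
      rw [decide_eq_true_iff]
      rw [show ((((0:Int) + (k:Int)), seq[k]) : Int × Int).1 = ((0:Int) + (k:Int)) from rfl]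
      rw [show ((0:Int) + (k:Int)) = (k : Int) by ring]
      exact (altLast_le_iff seq prev k hk).mpr ⟨hmem, by simpa using hnd⟩

-- hence the two checks agree
lemma check_eq_not_bad (d : PySem.Dict Int (List Int)) (seq : List Int) :
    day05Check d seq = !(day05AltBad d seq) := by
  rcases hb : day05AltBad d seq
  · rcases hc : day05Check d seq
    · exact absurd ((altBad_true_iff d seq).2 ((check_false_iff d seq).1 hc)) (by simp [hb])
    · rfl
  · rcases hc : day05Check d seq
    · rfl
    · exact absurd ((check_false_iff d seq).2 ((altBad_true_iff d seq).1 hb)) (by simp [hc])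

-- A's inner rules.items() scan decides 'no unfinished page must precede p'
lemma valid_iff (rules : List (Int × List Int)) (seq : List Int) (seen : PySem.Set Int) (p : Int) :
    day05SortValid (PySem.Dict.ofList rules) seq seen p = true ↔
    ∀ q, q ∈ seq → q ∉ seen → ¬ pvRel (PySem.Dict.ofList rules) q p := by
  unfold day05SortValid pvRel
  rw [Bool.not_eq_true', List.any_eq_false]
  constructor
  · intro h q hq hqs hrel
    have hcont : (PySem.Dict.ofList rules).contains q = true := by
      by_contra hc
      rw [Bool.not_eq_true] at hc
      rw [PySem.Dict.getD_of_not_contains _ [] hc] at hrel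
      simp at hrel
    obtain ⟨v, hv⟩ : ∃ v, (PySem.Dict.ofList rules).get? q = some v := by
      rw [PySem.Dict.contains_eq_isSome_get?] at hcont
      exact Option.isSome_iff_exists.mp hcont
    have hitems : (q, v) ∈ (PySem.Dict.ofList rules).items :=
      PySem.Dict.mem_items_of_get?_eq_some _ hv
    have := h (q, v) hitems
    rw [show ((q, v) : Int × List Int).1 = q from rfl, show ((q, v) : Int × List Int).2 = v from rfl]
      at this
    have hseen : PySem.Set.contains seen q = false := by
      simp [PySem.Set.contains, hqs]
    rw [hseen, decide_eq_true hq] at this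
    rw [PySem.Dict.getD_of_get?_eq_some _ [] hv] at hrel
    simp at this
    exact this hrel
  · intro h qv hqv
    by_cases hq : qv.1 ∈ seq
    · by_cases hqs : qv.1 ∈ seen
      · simp [PySem.Set.contains, hqs]
      · have hget : (PySem.Dict.ofList rules).getD qv.1 [] = qv.2 :=
          PySem.Dict.getD_of_mem_items _ hqv (PySem.Dict.nodup_keys_ofList rules) []
        have := h qv.1 hq hqs
        rw [hget] at this
        simp [PySem.Set.contains, hqs, hq, List.contains_eq_mem, this]
    · simp [hq]

-- a finite set with a strict total order has a minimal element
lemma exists_min (r : Int → Int → Prop) (seq : List Int)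
    (htot : ∀ x ∈ seq, ∀ y ∈ seq, x ≠ y → (r x y ↔ ¬ r y x))
    (htr : ∀ x ∈ seq, ∀ y ∈ seq, ∀ z ∈ seq, r x y → r y z → r x z)
    (R : List Int) (hsub : ∀ x ∈ R, x ∈ seq) (hne : R ≠ []) :
    ∃ m ∈ R, ∀ q ∈ R, q ≠ m → ¬ r q m := by
  induction R with
  | nil => exact absurd rfl hne
  | cons x R ih =>
    rcases eq_or_ne R [] with rfl | hR
    · exact ⟨x, List.mem_singleton_self x, fun q hq hqx => absurd (List.mem_singleton.mp hq) hqx⟩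
    · obtain ⟨m, hmR, hmin⟩ := ih (fun y hy => hsub y (List.mem_cons_of_mem x hy)) hR
      have hxseq := hsub x (List.mem_cons_self)
      have hmseq := hsub m (List.mem_cons_of_mem x hmR)
      rcases eq_or_ne x m with rfl | hxm
      · exact ⟨x, List.mem_cons_self, fun q hq hqx => by
          rcases List.mem_cons.mp hq with rfl | hq'
          · exact absurd rfl hqx
          · exact hmin q hq' hqx⟩
      · by_cases hxr : r x m
        · refine ⟨x, List.mem_cons_self, fun q hq hqx => ?_⟩
          rcases List.mem_cons.mp hq with rfl | hq'
          · exact absurd rfl hqx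
          · intro hqrx
            have hqseq := hsub q (List.mem_cons_of_mem x hq')
            rcases eq_or_ne q m with rfl | hqm
            · exact ((htot x hxseq q hqseq hxm).mp hxr) hqrx
            · exact hmin q hq' hqm (htr q (hsub q (List.mem_cons_of_mem x hq')) x hxseq m hmseq hqrx hxr)
        · refine ⟨m, List.mem_cons_of_mem x hmR, fun q hq hqm => ?_⟩
          rcases List.mem_cons.mp hq with rfl | hq'
          · exact hxr
          · exact hmin q hq' hqm

-- seen.add(p) appends when p is fresh
lemma set_add_eq_append (s : List Int) (p : Int) (h : p ∉ s) :
    PySem.Set.add s p = s ++ [p] := by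
  simp [PySem.Set.add, PySem.Set.contains, h]

-- a duplicate-free subset of equal length is a permutation
lemma perm_of_nodup_subset_length (l seq : List Int) (hnd : l.Nodup)
    (hsub : ∀ x ∈ l, x ∈ seq) (hlen : seq.length ≤ l.length) : l.Perm seq :=
  (hnd.subperm (fun {x} hx => hsub x hx)).perm_of_length_le hlen

-- A's selection loop returns a permutation of seq sorted by the rules
lemma sortLoop_spec (rules : List (Int × List Int)) (seq : List Int) (hnd : seq.Nodup)
    (hirr : ∀ x ∈ seq, ¬ pvRel (PySem.Dict.ofList rules) x x)
    (htot : ∀ x ∈ seq, ∀ y ∈ seq, x ≠ y →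
      (pvRel (PySem.Dict.ofList rules) x y ↔ ¬ pvRel (PySem.Dict.ofList rules) y x))
    (htr : ∀ x ∈ seq, ∀ y ∈ seq, ∀ z ∈ seq, pvRel (PySem.Dict.ofList rules) x y →
      pvRel (PySem.Dict.ofList rules) y z → pvRel (PySem.Dict.ofList rules) x z) :
    ∀ (fuel : Nat) (result : List Int),
      fuel + result.length = seq.length →
      result.Nodup →
      (∀ x ∈ result, x ∈ seq) →
      (∀ x ∈ result, ∀ y ∈ seq, y ∉ result → pvRel (PySem.Dict.ofList rules) x y) →
      result.Pairwise (pvRel (PySem.Dict.ofList rules)) →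
      (day05SortLoop (PySem.Dict.ofList rules) seq fuel result result).Perm seq ∧
      (day05SortLoop (PySem.Dict.ofList rules) seq fuel result result).Pairwise
        (pvRel (PySem.Dict.ofList rules)) := by
  intro fuel
  induction fuel with
  | zero =>
    intro result hlen hrnd hsub hbelow hpw
    refine ⟨?_, by simpa [day05SortLoop] using hpw⟩
    simp only [day05SortLoop]
    exact perm_of_nodup_subset_length result seq hrnd hsub (by omega)
  | succ fuel ih =>
    intro result hlen hrnd hsub hbelow hpw
    have hlt : result.length < seq.length := by omega
    have hex : ∃ y, y ∈ seq ∧ y ∉ result := by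
      by_contra hcon
      push Not at hcon
      have : seq.length ≤ result.length :=
        (perm_of_nodup_subset_length seq result hnd hcon hlt.le).length_eq.le
      omega
    obtain ⟨y0, hy0seq, hy0r⟩ := hex
    have hRne : seq.filter (fun y => decide (y ∉ result)) ≠ [] := by
      intro hnil
      have : y0 ∈ seq.filter (fun y => decide (y ∉ result)) := by
        rw [List.mem_filter]; exact ⟨hy0seq, by simpa using hy0r⟩
      rw [hnil] at this; exact absurd this (List.not_mem_nil)
    obtain ⟨m, hmR, hmin⟩ := exists_min (pvRel (PySem.Dict.ofList rules)) seq htot htr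
      (seq.filter (fun y => decide (y ∉ result)))
      (fun x hx => (List.mem_filter.mp hx).1) hRne
    have hmseq : m ∈ seq := (List.mem_filter.mp hmR).1
    have hmres : m ∉ result := by simpa using (List.mem_filter.mp hmR).2
    have hvalidm : day05SortValid (PySem.Dict.ofList rules) seq result m = true := by
      rw [valid_iff]
      intro q hq hqs hrel
      rcases eq_or_ne q m with rfl | hqm
      · exact hirr q hq hrel
      · exact hmin q (by rw [List.mem_filter]; exact ⟨hq, by simpa using hqs⟩) hqm hrel
    have hpredm : (!(PySem.Set.contains result m) && day05SortValid (PySem.Dict.ofList rules) seq result m) = true := by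
      rw [Bool.and_eq_true, hvalidm]
      refine ⟨by simp [PySem.Set.contains, hmres], rfl⟩
    have hsome : (seq.find? (fun p => !(PySem.Set.contains result p) &&
        day05SortValid (PySem.Dict.ofList rules) seq result p)).isSome := by
      rw [List.find?_isSome]
      exact ⟨m, hmseq, hpredm⟩
    obtain ⟨p, hp⟩ := Option.isSome_iff_exists.mp hsome
    have hpseq : p ∈ seq := List.mem_of_find?_eq_some hp
    have hppred := List.find?_some hp
    rw [Bool.and_eq_true] at hppred
    have hpres : p ∉ result := by
      have := hppred.1
      simpa [PySem.Set.contains] using this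
    have hvp : ∀ q, q ∈ seq → q ∉ result → ¬ pvRel (PySem.Dict.ofList rules) q p :=
      (valid_iff rules seq result p).mp hppred.2
    have hstep : day05SortLoop (PySem.Dict.ofList rules) seq (fuel + 1) result result =
        day05SortLoop (PySem.Dict.ofList rules) seq fuel (result ++ [p]) (result ++ [p]) := by
      rw [day05SortLoop, if_pos hlt, hp]
      dsimp only
      rw [set_add_eq_append result p hpres]
    rw [hstep]
    apply ih (result ++ [p])
    · simp; omega
    · exact List.Nodup.append hrnd (List.nodup_singleton p)
        (by intro x hx hx'; rw [List.mem_singleton] at hx'; subst hx'; exact hpres hx)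
    · intro x hx
      rcases List.mem_append.mp hx with hx | hx
      · exact hsub x hx
      · rw [List.mem_singleton] at hx; subst hx; exact hpseq
    · intro x hx z hz hzr
      have hznr : z ∉ result := fun hc => hzr (List.mem_append.mpr (Or.inl hc))
      have hznp : z ≠ p := fun hc => hzr (by subst hc; exact List.mem_append.mpr (Or.inr (List.mem_singleton_self _)))
      rcases List.mem_append.mp hx with hx | hx
      · exact hbelow x hx z hz hznr
      · rw [List.mem_singleton] at hx
        rw [hx]
        exact (htot p hpseq z hz (fun he => hznp he.symm)).mpr (hvp z hz hznr)
    · rw [List.pairwise_append]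
      exact ⟨hpw, List.pairwise_singleton _ _,
        fun x hx z hz => by rw [List.mem_singleton] at hz; rw [hz]; exact hbelow x hx p hpseq hpres⟩

-- in a rules-sorted duplicate-free list, the element at index k has exactly k predecessors in seq
lemma count_rank (rules : List (Int × List Int)) (seq l : List Int) (hnd : seq.Nodup)
    (htot : ∀ x ∈ seq, ∀ y ∈ seq, x ≠ y →
      (pvRel (PySem.Dict.ofList rules) x y ↔ ¬ pvRel (PySem.Dict.ofList rules) y x))
    (hperm : l.Perm seq) (hpw : l.Pairwise (pvRel (PySem.Dict.ofList rules)))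
    (k : Nat) (hk : k < l.length) :
    day05AltCount (PySem.Dict.ofList rules) seq l[k] = (k : Int) := by
  have hlnd : l.Nodup := (hperm.nodup_iff).mpr hnd
  unfold day05AltCount
  rw [show seq.countP (fun q => q != l[k] && ((PySem.Dict.ofList rules).getD q []).contains l[k])
      = l.countP (fun q => q != l[k] && ((PySem.Dict.ofList rules).getD q []).contains l[k]) from
      (hperm.countP_eq _).symm]
  have hsplit : l = l.take k ++ l[k] :: l.drop (k+1) := by
    conv_lhs => rw [← List.take_append_drop k l]
    rw [List.drop_eq_getElem_cons hk]
  rw [show l.countP (fun q => q != l[k] && ((PySem.Dict.ofList rules).getD q []).contains l[k])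
      = (l.take k ++ l[k] :: l.drop (k+1)).countP
          (fun q => q != l[k] && ((PySem.Dict.ofList rules).getD q []).contains l[k]) from by
      rw [← hsplit]]
  rw [List.countP_append, List.countP_cons]
  have h1 : (l.take k).countP (fun q => q != l[k] && ((PySem.Dict.ofList rules).getD q []).contains l[k])
      = (l.take k).length := by
    rw [List.countP_eq_length]
    intro a ha
    obtain ⟨j, hj, rfl⟩ := List.getElem_of_mem ha
    have hjk : j < k := by
      have := (l.take k).length
      have hlen := @List.length_take _ k l
      omega
    rw [List.getElem_take]
    have hjl : j < l.length := by omega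
    have hne : l[j] ≠ l[k] := by
      intro he
      exact absurd (hlnd.getElem_inj_iff.mp he) (by omega)
    have hrel : pvRel (PySem.Dict.ofList rules) l[j] l[k] :=
      List.pairwise_iff_getElem.mp hpw j k hjl hk hjk
    unfold pvRel at hrel
    simp [bne_iff_ne, hne, List.contains_eq_mem, hrel]
  have h2 : ((l[k] != l[k] && ((PySem.Dict.ofList rules).getD l[k] []).contains l[k])) = false := by
    simp
  have h3 : (l.drop (k+1)).countP (fun q => q != l[k] && ((PySem.Dict.ofList rules).getD q []).contains l[k])
      = 0 := by
    rw [List.countP_eq_zero]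
    intro a ha
    obtain ⟨j, hj, rfl⟩ := List.getElem_of_mem ha
    rw [List.getElem_drop]
    have hjl : k + 1 + j < l.length := by
      have := @List.length_drop _ (k+1) l
      omega
    have hne : l[k+1+j] ≠ l[k] := by
      intro he
      exact absurd (hlnd.getElem_inj_iff.mp he) (by omega)
    have hrel : pvRel (PySem.Dict.ofList rules) l[k] l[k+1+j] :=
      List.pairwise_iff_getElem.mp hpw k (k+1+j) hk hjl (by omega)
    have hnrel : ¬ pvRel (PySem.Dict.ofList rules) l[k+1+j] l[k] := by
      have hm1 : l[k+1+j] ∈ seq := hperm.subset (List.getElem_mem hjl)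
      have hm2 : l[k] ∈ seq := hperm.subset (List.getElem_mem hk)
      intro hc
      exact ((htot l[k+1+j] hm1 l[k] hm2 hne).mp hc) hrel
    unfold pvRel at hnrel
    simp [List.contains_eq_mem, hnrel]
  rw [h1, h2, h3]
  simp [List.length_take, Nat.min_eq_left hk.le]

-- len(seq) // 2 as a Nat
lemma middle_eq (seq : List Int) :
    PySem.Int.floordiv (PySem.List.len seq) 2 = ((seq.length / 2 : Nat) : Int) := by
  rw [PySem.List.len_eq]
  exact_mod_cast PySem.Int.floordiv_natCast seq.length 2

-- B's predecessor-count search finds exactly the middle element of A's sorted list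
lemma find_mid (rules : List (Int × List Int)) (seq l : List Int) (hnd : seq.Nodup)
    (htot : ∀ x ∈ seq, ∀ y ∈ seq, x ≠ y →
      (pvRel (PySem.Dict.ofList rules) x y ↔ ¬ pvRel (PySem.Dict.ofList rules) y x))
    (hperm : l.Perm seq) (hpw : l.Pairwise (pvRel (PySem.Dict.ofList rules)))
    (mid : Nat) (hmid : mid < l.length) :
    seq.find? (fun p => day05AltCount (PySem.Dict.ofList rules) seq p == ((mid : Nat) : Int))
      = some l[mid] := by
  have hlnd : l.Nodup := (hperm.nodup_iff).mpr hnd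
  have key : ∀ p ∈ seq,
      ((day05AltCount (PySem.Dict.ofList rules) seq p == ((mid : Nat) : Int)) = true ↔ p = l[mid]) := by
    intro p hp
    have hpl : p ∈ l := hperm.mem_iff.mpr hp
    obtain ⟨k, hkl, rfl⟩ := List.getElem_of_mem hpl
    rw [count_rank rules seq l hnd htot hperm hpw k hkl]
    rw [beq_iff_eq]
    constructor
    · intro h
      have hkm : k = mid := by exact_mod_cast h
      subst hkm; rfl
    · intro h
      have hkm : k = mid := hlnd.getElem_inj_iff.mp h
      exact_mod_cast congrArg (fun n : Nat => (n : Int)) hkm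
  have hmem : l[mid] ∈ seq := hperm.subset (List.getElem_mem hmid)
  have hsome : (seq.find? (fun p =>
      day05AltCount (PySem.Dict.ofList rules) seq p == ((mid : Nat) : Int))).isSome := by
    rw [List.find?_isSome]
    exact ⟨l[mid], hmem, (key _ hmem).mpr rfl⟩
  obtain ⟨y, hy⟩ := Option.isSome_iff_exists.mp hsome
  have hyseq : y ∈ seq := List.mem_of_find?_eq_some hy
  have hpy := List.find?_some hy
  rw [hy]
  exact congrArg some ((key y hyseq).mp hpy)

-- per-sequence equality of the two folds' step functions
lemma step_eq (rules : List (Int × List Int)) (seq : List Int)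
    (hpre : seq ≠ [] ∧
      ((∀ (i : Fin seq.length), ∀ prev ∈ (PySem.Dict.ofList rules).getD seq[i] [],
          prev ∈ seq → prev ∈ seq.drop (i.1 + 1))
       ∨ (seq.Nodup
          ∧ (∀ x ∈ seq, x ∉ (PySem.Dict.ofList rules).getD x [])
          ∧ (∀ x ∈ seq, ∀ y ∈ seq, x ≠ y →
              (y ∈ (PySem.Dict.ofList rules).getD x [] ↔ x ∉ (PySem.Dict.ofList rules).getD y []))
          ∧ (∀ x ∈ seq, ∀ y ∈ seq, ∀ z ∈ seq,
              y ∈ (PySem.Dict.ofList rules).getD x [] → z ∈ (PySem.Dict.ofList rules).getD y [] →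
              z ∈ (PySem.Dict.ofList rules).getD x [])))) (acc : Int × Int) :
    (let middle := PySem.Int.floordiv (PySem.List.len seq) 2
     if day05Check (PySem.Dict.ofList rules) seq then
       (acc.1 + PySem.List.pyGetD seq middle 0, acc.2)
     else
       (acc.1, acc.2 + PySem.List.pyGetD (day05Sort (PySem.Dict.ofList rules) seq) middle 0)) =
    (let middle := PySem.Int.floordiv (PySem.List.len seq) 2
     if !(day05AltBad (PySem.Dict.ofList rules) seq) then
       (acc.1 + PySem.List.pyGetD seq middle 0, acc.2)
     else
       (acc.1, acc.2 + (match seq.find? (fun p =>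
            day05AltCount (PySem.Dict.ofList rules) seq p == middle) with
          | some p => p
          | none => 0))) := by
  obtain ⟨hne, hdisj⟩ := hpre
  simp only [check_eq_not_bad]
  rcases hbad : day05AltBad (PySem.Dict.ofList rules) seq with _ | _
  · simp
  · simp only [Bool.not_true, Bool.false_eq_true, if_false]
    -- the sequence violates the ordering: the strict-total-order clause of Pre_ applies
    have hord : ¬ (∀ (i : Fin seq.length), ∀ prev ∈ (PySem.Dict.ofList rules).getD seq[i] [],
        prev ∈ seq → prev ∈ seq.drop (i.1 + 1)) := by
      intro hord
      obtain ⟨i, prev, hprev, hmem, hnd⟩ := (altBad_true_iff _ seq).mp hbad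
      exact hnd (hord i prev hprev hmem)
    rcases hdisj with hord' | ⟨hnd, hirr, htot, htr⟩
    · exact absurd hord' hord
    have hirr' : ∀ x ∈ seq, ¬ pvRel (PySem.Dict.ofList rules) x x := fun x hx => hirr x hx
    have htot' : ∀ x ∈ seq, ∀ y ∈ seq, x ≠ y →
        (pvRel (PySem.Dict.ofList rules) x y ↔ ¬ pvRel (PySem.Dict.ofList rules) y x) :=
      fun x hx y hy hxy => htot x hx y hy hxy
    have htr' : ∀ x ∈ seq, ∀ y ∈ seq, ∀ z ∈ seq, pvRel (PySem.Dict.ofList rules) x y →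
        pvRel (PySem.Dict.ofList rules) y z → pvRel (PySem.Dict.ofList rules) x z :=
      fun x hx y hy z hz => htr x hx y hy z hz
    obtain ⟨hperm0, hpw0⟩ := sortLoop_spec rules seq hnd hirr' htot' htr' seq.length []
      (by simp) List.nodup_nil (by simp) (by simp) List.Pairwise.nil
    have hperm : (day05Sort (PySem.Dict.ofList rules) seq).Perm seq := hperm0
    have hpw : (day05Sort (PySem.Dict.ofList rules) seq).Pairwise
        (pvRel (PySem.Dict.ofList rules)) := hpw0
    have hlen0 : 0 < seq.length := List.length_pos_iff.mpr hne
    have hmid : seq.length / 2 < (day05Sort (PySem.Dict.ofList rules) seq).length := by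
      rw [hperm.length_eq]
      exact Nat.div_lt_self hlen0 (by norm_num)
    have hfind := find_mid rules seq (day05Sort (PySem.Dict.ofList rules) seq)
      hnd htot' hperm hpw (seq.length / 2) hmid
    rw [middle_eq, hfind]
    dsimp only
    congr 1
    congr 1
    rw [PySem.List.pyGetD_natCast]
    exact List.getD_eq_getElem _ 0 hmid

-- ===== VERDICT (by name: the statement is the Claim_ definition above) =====
theorem day05_spec : Claim_equal_day05 := by
  intro rules sequences _ hpre
  unfold Spec_day05 day05 day05_alt
  apply PySem.List.foldl_congr_mem
  intro acc seq hmem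
  exact step_eq rules seq (hpre seq hmem) acc
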